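-- pv_equiv track=rewrite | github.com/Tzeentchnet/NifBlend | nifblend/bridge/games/skyrim.py | _move_bits
-- ===== SOURCE A (Python) =====
-- def _move_bits(
--     flags_1: int,
--     flags_2: int,
--     moves: tuple[tuple[int, int, int, int], ...],
-- ) -> tuple[int, int]:
--     src = {1: int(flags_1) & 0xFFFFFFFF, 2: int(flags_2) & 0xFFFFFFFF}
--     # First clear all source/destination bits, then set destinations from
--     # source bit values. Two-pass so a swap (a→b, b→a) is well-defined.
--     dst = {1: src[1], 2: src[2]}
--     for sw, sb, dw, db in moves:
--         dst[sw] &= ~(1 << sb)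
--         dst[dw] &= ~(1 << db)
--     for sw, sb, dw, db in moves:
--         bit = (src[sw] >> sb) & 1
--         if bit:
--             dst[dw] |= 1 << db
--     return dst[1], dst[2]
-- ===== SOURCE B (Python) =====
-- def _move_bits(
--     flags_1: int,
--     flags_2: int,
--     moves: tuple[tuple[int, int, int, int], ...],
-- ) -> tuple[int, int]:
--     # Rebuild each word bit-by-bit: a bit of the original word survives iff its
--     # position is never referenced by any move (a "touched" set of (word, pos)
--     # pairs); on top of that, OR in every destination whose source bit was 1.
--     src = {1: int(flags_1) & 0xFFFFFFFF, 2: int(flags_2) & 0xFFFFFFFF}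
--     touched = {(sw, sb) for sw, sb, dw, db in moves} | {(dw, db) for sw, sb, dw, db in moves}
--     ones = [(dw, db) for sw, sb, dw, db in moves if (src[sw] >> sb) & 1]
--     out = []
--     for w in (1, 2):
--         r = 0
--         for i in range(32):
--             if (src[w] >> i) & 1 and (w, i) not in touched:
--                 r |= 1 << i
--         for w2, p in ones:
--             if w2 == w:
--                 r |= 1 << p
--         out.append(r)
--     return out[0], out[1]
-- ===== Notes on version B (the rewrite author's own statement) =====
-- stated objective: alternative
-- what changed: Instead of A's two passes that mutate the flag words in place (clear every referenced bit, then set destination bits), B never edits the words: it builds a set of touched (word,position) pairs and a list of destinations whose source bit is 1, then reconstructs each output word bit-by-bit over the 32 word positions by membership tests, OR-ing in the surviving original bits and the destination bits.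
import Mathlib
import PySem

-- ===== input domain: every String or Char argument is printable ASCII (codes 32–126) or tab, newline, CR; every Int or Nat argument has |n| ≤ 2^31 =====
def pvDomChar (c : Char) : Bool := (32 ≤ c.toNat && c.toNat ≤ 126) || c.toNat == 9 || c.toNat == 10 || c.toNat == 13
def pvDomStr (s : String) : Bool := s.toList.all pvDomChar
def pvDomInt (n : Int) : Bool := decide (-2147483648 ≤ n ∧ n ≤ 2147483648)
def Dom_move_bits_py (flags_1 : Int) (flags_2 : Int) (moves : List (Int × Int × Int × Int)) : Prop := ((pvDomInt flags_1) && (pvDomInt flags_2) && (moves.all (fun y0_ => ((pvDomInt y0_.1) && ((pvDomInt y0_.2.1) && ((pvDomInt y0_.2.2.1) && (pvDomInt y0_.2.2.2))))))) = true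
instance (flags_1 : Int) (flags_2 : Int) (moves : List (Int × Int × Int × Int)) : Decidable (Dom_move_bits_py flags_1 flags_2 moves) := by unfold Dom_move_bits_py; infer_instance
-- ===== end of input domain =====

-- B replaces A's two in-place clear/set passes over the flag words by a bit-by-bit
-- reconstruction: a set of touched (word,position) pairs plus a list of destinations whose
-- source bit is 1, each output word rebuilt over its 32 positions (objective: alternative).

-- Python's '>>' / '<<' with a Nat shift count (core Lean shift, exact per PYSEM.md);
-- named wrappers only to pin one HShift instance for both ports and all lemmas.
def pvShr (a : Int) (k : Nat) : Int := a >>> k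
def pvShl (a : Int) (k : Nat) : Int := a <<< k

-- ===== PORT A =====
-- the dict {1: _, 2: _} is modelled as a pair; under Pre_ every word key is 1 or 2, so
-- 'if key = 1 then word1 else word2' is exact.  Python 'dst[sw] &= ~(1 << sb)' etc.
def pvClearStep (d : Int × Int) (m : Int × Int × Int × Int) : Int × Int :=
  let d := if m.1 = 1 then (PySem.Int.band d.1 (Int.not (pvShl 1 m.2.1.toNat)), d.2)
           else (d.1, PySem.Int.band d.2 (Int.not (pvShl 1 m.2.1.toNat)))
  if m.2.2.1 = 1 then (PySem.Int.band d.1 (Int.not (pvShl 1 m.2.2.2.toNat)), d.2)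
  else (d.1, PySem.Int.band d.2 (Int.not (pvShl 1 m.2.2.2.toNat)))

-- Python 'bit = (src[sw] >> sb) & 1; if bit: dst[dw] |= 1 << db'
def pvSetStep (src1 src2 : Int) (d : Int × Int) (m : Int × Int × Int × Int) : Int × Int :=
  let bit := PySem.Int.band (pvShr (if m.1 = 1 then src1 else src2) m.2.1.toNat) 1
  if bit ≠ 0 then
    if m.2.2.1 = 1 then (PySem.Int.bor d.1 (pvShl 1 m.2.2.2.toNat), d.2)
    else (d.1, PySem.Int.bor d.2 (pvShl 1 m.2.2.2.toNat))
  else d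

def move_bits_py (flags_1 : Int) (flags_2 : Int) (moves : List (Int × Int × Int × Int)) : Int × Int :=
  let src1 := PySem.Int.band flags_1 0xFFFFFFFF
  let src2 := PySem.Int.band flags_2 0xFFFFFFFF
  let dst := moves.foldl pvClearStep (src1, src2)
  let dst := moves.foldl (pvSetStep src1 src2) dst
  dst

-- ===== PORT B =====
-- 'touched' is the Python set union of the two pair comprehensions; 'ones' is a list
-- comprehension; each word is rebuilt by the range(32) loop plus the loop over 'ones'.
def move_bits_py_alt (flags_1 : Int) (flags_2 : Int) (moves : List (Int × Int × Int × Int)) : Int × Int :=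
  let src1 := PySem.Int.band flags_1 0xFFFFFFFF
  let src2 := PySem.Int.band flags_2 0xFFFFFFFF
  let touched : PySem.Set (Int × Int) :=
    PySem.Set.union (PySem.Set.ofList (moves.map (fun m => ((m.1, m.2.1) : Int × Int))))
                    (moves.map (fun m => ((m.2.2.1, m.2.2.2) : Int × Int)))
  let ones : List (Int × Int) := (moves.filter (fun m =>
      decide (PySem.Int.band (pvShr (if m.1 = (1:Int) then src1 else src2) m.2.1.toNat) 1 ≠ 0))).map
      (fun m => ((m.2.2.1, m.2.2.2) : Int × Int))
  let word := fun (w s : Int) =>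
    let r := (PySem.List.pyRange 0 32 1).foldl (fun r i =>
        if PySem.Int.band (pvShr s i.toNat) 1 ≠ 0 ∧ ¬ (w, i) ∈ touched then
          PySem.Int.bor r (pvShl 1 i.toNat) else r) 0
    ones.foldl (fun r p => if p.1 = w then PySem.Int.bor r (pvShl 1 p.2.toNat) else r) r
  (word 1 src1, word 2 src2)

-- ===== PRECONDITION & SPEC =====
-- Pre_ excludes exactly the inputs where Python A raises: a word index other than 1/2
-- (KeyError on the dict) or a negative shift amount (ValueError on '<<').
def Pre_move_bits_py (flags_1 : Int) (flags_2 : Int) (moves : List (Int × Int × Int × Int)) : Prop :=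
  ∀ m ∈ moves, (m.1 = 1 ∨ m.1 = 2) ∧ 0 ≤ m.2.1 ∧ (m.2.2.1 = 1 ∨ m.2.2.1 = 2) ∧ 0 ≤ m.2.2.2
instance (flags_1 : Int) (flags_2 : Int) (moves : List (Int × Int × Int × Int)) : Decidable (Pre_move_bits_py flags_1 flags_2 moves) := by unfold Pre_move_bits_py; infer_instance

def pvWitness_move_bits_py : Int × Int × (List (Int × Int × Int × Int)) := (5, 3, [(1, 0, 2, 1)])

def Spec_move_bits_py (flags_1 : Int) (flags_2 : Int) (moves : List (Int × Int × Int × Int)) (out : Int × Int) : Prop := out = move_bits_py_alt flags_1 flags_2 moves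
instance (flags_1 : Int) (flags_2 : Int) (moves : List (Int × Int × Int × Int)) (out : Int × Int) : Decidable (Spec_move_bits_py flags_1 flags_2 moves out) := by unfold Spec_move_bits_py; infer_instance

-- ===== CLAIM (what is proved, stated in full; the proofs are below) =====
def Claim_equal_move_bits_py : Prop := ∀ (flags_1 : Int) (flags_2 : Int) (moves : List (Int × Int × Int × Int)), Dom_move_bits_py flags_1 flags_2 moves → Pre_move_bits_py flags_1 flags_2 moves → Spec_move_bits_py flags_1 flags_2 moves (move_bits_py flags_1 flags_2 moves)

-- ===== LEMMAS AND PROOFS =====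

-- per-move clear masks of word 1 / word 2, and set masks given the (Nat) source words
def pvCm1 (m : Int × Int × Int × Int) : Nat :=
  (if m.1 = 1 then 1 <<< m.2.1.toNat else 0) ||| (if m.2.2.1 = 1 then 1 <<< m.2.2.2.toNat else 0)
def pvCm2 (m : Int × Int × Int × Int) : Nat :=
  (if m.1 = 1 then 0 else 1 <<< m.2.1.toNat) ||| (if m.2.2.1 = 1 then 0 else 1 <<< m.2.2.2.toNat)
def pvSm1 (s1 s2 : Nat) (m : Int × Int × Int × Int) : Nat :=
  if PySem.Int.band (pvShr (if m.1 = 1 then (s1 : Int) else (s2 : Int)) m.2.1.toNat) 1 ≠ 0 then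
    (if m.2.2.1 = 1 then 1 <<< m.2.2.2.toNat else 0) else 0
def pvSm2 (s1 s2 : Nat) (m : Int × Int × Int × Int) : Nat :=
  if PySem.Int.band (pvShr (if m.1 = 1 then (s1 : Int) else (s2 : Int)) m.2.1.toNat) 1 ≠ 0 then
    (if m.2.2.1 = 1 then 0 else 1 <<< m.2.2.2.toNat) else 0

def pvAcc (f : Int × Int × Int × Int → Nat) : List (Int × Int × Int × Int) → Nat
  | [] => 0
  | m :: ms => f m ||| pvAcc f ms

theorem pv_sub_and_eq_ldiff (m n : Nat) : m - (m &&& n) = Nat.ldiff m n := by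
  induction m using Nat.binaryRec generalizing n with
  | zero => simp [Nat.ldiff]
  | bit a m ih =>
    induction n using Nat.binaryRec with
    | zero => simp [Nat.ldiff]
    | bit b n _ =>
      rw [Nat.land_bit, Nat.ldiff_bit, ← ih n]
      have h : m &&& n ≤ m := Nat.and_le_left
      cases a <;> cases b <;> simp [Nat.bit_val] <;> omega

theorem pv_band_not_cast (a b : Nat) : PySem.Int.band (a : Int) (Int.not (b : Int)) = ((Nat.ldiff a b : Nat) : Int) := by
  show PySem.Int.band (Int.ofNat a) (Int.negSucc b) = _
  simp [PySem.Int.band, pv_sub_and_eq_ldiff]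

theorem pv_shift_cast (k : Nat) : pvShl 1 k = ((1 <<< k : Nat) : Int) := rfl

theorem pv_band_not_shift (a k : Nat) : PySem.Int.band (a : Int) (Int.not (pvShl 1 k)) = ((Nat.ldiff a (1 <<< k) : Nat) : Int) := by
  rw [pv_shift_cast]; exact pv_band_not_cast a _

theorem pv_bor_shift (a k : Nat) : PySem.Int.bor (a : Int) (pvShl 1 k) = ((a ||| 1 <<< k : Nat) : Int) := by
  rw [pv_shift_cast]; exact PySem.Int.bor_natCast a (1 <<< k)

theorem pv_shr_cast (s k : Nat) : pvShr (s : Int) k = ((s >>> k : Nat) : Int) := by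
  simp [pvShr, Int.natCast_shiftRight]

theorem pv_ld_zero (a : Nat) : Nat.ldiff a 0 = a := by
  apply Nat.eq_of_testBit_eq; intro i; simp [Nat.testBit_ldiff]

theorem pv_ld_ld (a x y : Nat) : Nat.ldiff (Nat.ldiff a x) y = Nat.ldiff a (x ||| y) := by
  apply Nat.eq_of_testBit_eq; intro i
  simp [Nat.testBit_ldiff, Nat.testBit_or, Bool.and_assoc]

theorem pv_or_assoc (a x y : Nat) : (a ||| x) ||| y = a ||| (x ||| y) := Nat.or_assoc a x y

theorem pv_clear_fold (ms : List (Int × Int × Int × Int)) (d1 d2 : Nat) :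
    ms.foldl pvClearStep ((d1 : Int), (d2 : Int)) =
      (((Nat.ldiff d1 (pvAcc pvCm1 ms) : Nat) : Int), ((Nat.ldiff d2 (pvAcc pvCm2 ms) : Nat) : Int)) := by
  induction ms generalizing d1 d2 with
  | nil => simp [pvAcc, pv_ld_zero]
  | cons m ms ih =>
    have hstep : pvClearStep ((d1 : Int), (d2 : Int)) m =
        (((Nat.ldiff d1 (pvCm1 m) : Nat) : Int), ((Nat.ldiff d2 (pvCm2 m) : Nat) : Int)) := by
      unfold pvClearStep pvCm1 pvCm2
      by_cases h1 : m.1 = 1 <;> by_cases h2 : m.2.2.1 = 1 <;>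
        simp [h1, h2, pv_band_not_shift, pv_ld_zero, pv_ld_ld]
    rw [List.foldl_cons, hstep, ih, pvAcc, pvAcc, pv_ld_ld, pv_ld_ld]

theorem pv_set_fold (ms : List (Int × Int × Int × Int)) (s1 s2 d1 d2 : Nat) :
    ms.foldl (pvSetStep (s1 : Int) (s2 : Int)) ((d1 : Int), (d2 : Int)) =
      (((d1 ||| pvAcc (pvSm1 s1 s2) ms : Nat) : Int), ((d2 ||| pvAcc (pvSm2 s1 s2) ms : Nat) : Int)) := by
  induction ms generalizing d1 d2 with
  | nil => simp [pvAcc]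
  | cons m ms ih =>
    have hstep : pvSetStep (s1 : Int) (s2 : Int) ((d1 : Int), (d2 : Int)) m =
        (((d1 ||| pvSm1 s1 s2 m : Nat) : Int), ((d2 ||| pvSm2 s1 s2 m : Nat) : Int)) := by
      unfold pvSetStep pvSm1 pvSm2
      by_cases h2 : m.2.2.1 = 1 <;>
        simp [h2] <;> split <;> split <;> first | rfl | simp [pv_bor_shift]
    rw [List.foldl_cons, hstep, ih, pvAcc, pvAcc, pv_or_assoc, pv_or_assoc]

theorem pv_src_nonneg (f : Int) : 0 ≤ PySem.Int.band f 0xFFFFFFFF := by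
  rw [PySem.Int.band_comm]
  exact PySem.Int.band_nonneg_of_nonneg_left _ (by norm_num)

theorem pv_src_lt (f : Int) : (PySem.Int.band f 0xFFFFFFFF).toNat < 2 ^ 32 := by
  cases f with
  | ofNat n =>
      show (PySem.Int.band (Int.ofNat n) (Int.ofNat 0xFFFFFFFF)).toNat < 2 ^ 32
      simp [PySem.Int.band]
      have := Nat.and_le_right (n := n) (m := 0xFFFFFFFF)
      omega
  | negSucc m =>
      show (PySem.Int.band (Int.negSucc m) (Int.ofNat 0xFFFFFFFF)).toNat < 2 ^ 32
      simp [PySem.Int.band]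
      omega

-- B-side: fold over the 'ones' list (filtered map) accumulates exactly the set masks
theorem pv_ones_fold1 (ms : List (Int × Int × Int × Int)) (s1 s2 r0 : Nat) :
    ((ms.filter (fun m =>
        decide (PySem.Int.band (pvShr (if m.1 = (1:Int) then (s1:Int) else (s2:Int)) m.2.1.toNat) 1 ≠ 0))).map
        (fun m => ((m.2.2.1, m.2.2.2) : Int × Int))).foldl
      (fun r p => if p.1 = (1:Int) then PySem.Int.bor r (pvShl 1 p.2.toNat) else r) (r0 : Int)
    = ((r0 ||| pvAcc (pvSm1 s1 s2) ms : Nat) : Int) := by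
  induction ms generalizing r0 with
  | nil => simp [pvAcc]
  | cons m ms ih =>
    rw [List.filter_cons]
    by_cases hb : PySem.Int.band (pvShr (if m.1 = (1:Int) then (s1:Int) else (s2:Int)) m.2.1.toNat) 1 ≠ 0
    · rw [if_pos (decide_eq_true hb), List.map_cons, List.foldl_cons]
      by_cases hd : m.2.2.1 = (1:Int)
      · show List.foldl _ (if ((m.2.2.1 : Int) = (1:Int)) then _ else _) _ = _
        rw [if_pos hd, pv_bor_shift, ih]
        simp [pvAcc, pvSm1, hb, hd, Nat.or_assoc]
      · show List.foldl _ (if ((m.2.2.1 : Int) = (1:Int)) then _ else _) _ = _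
        rw [if_neg hd, ih]
        simp [pvAcc, pvSm1, hb, hd]
    · rw [if_neg (by simpa using hb), ih]
      have h0 : pvSm1 s1 s2 m = 0 := by rw [pvSm1, if_neg hb]
      simp [pvAcc, h0]

theorem pv_ones_fold2 (ms : List (Int × Int × Int × Int)) (s1 s2 r0 : Nat)
    (hpre : ∀ m ∈ ms, m.2.2.1 = (1:Int) ∨ m.2.2.1 = (2:Int)) :
    ((ms.filter (fun m =>
        decide (PySem.Int.band (pvShr (if m.1 = (1:Int) then (s1:Int) else (s2:Int)) m.2.1.toNat) 1 ≠ 0))).map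
        (fun m => ((m.2.2.1, m.2.2.2) : Int × Int))).foldl
      (fun r p => if p.1 = (2:Int) then PySem.Int.bor r (pvShl 1 p.2.toNat) else r) (r0 : Int)
    = ((r0 ||| pvAcc (pvSm2 s1 s2) ms : Nat) : Int) := by
  induction ms generalizing r0 with
  | nil => simp [pvAcc]
  | cons m ms ih =>
    have hmh := hpre m (by simp)
    have hmt : ∀ x ∈ ms, x.2.2.1 = (1:Int) ∨ x.2.2.1 = (2:Int) := fun x hx => hpre x (by simp [hx])
    rw [List.filter_cons]
    by_cases hb : PySem.Int.band (pvShr (if m.1 = (1:Int) then (s1:Int) else (s2:Int)) m.2.1.toNat) 1 ≠ 0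
    · rw [if_pos (decide_eq_true hb), List.map_cons, List.foldl_cons]
      by_cases hd : m.2.2.1 = (2:Int)
      · show List.foldl _ (if ((m.2.2.1 : Int) = (2:Int)) then _ else _) _ = _
        rw [if_pos hd, pv_bor_shift, ih _ hmt]
        have hne : ¬ (m.2.2.1 = (1:Int)) := by rw [hd]; decide
        simp [pvAcc, pvSm2, hb, hne, Nat.or_assoc]
      · show List.foldl _ (if ((m.2.2.1 : Int) = (2:Int)) then _ else _) _ = _
        rw [if_neg hd, ih _ hmt]
        have h1 : m.2.2.1 = (1:Int) := by rcases hmh with h | h; exacts [h, absurd h hd]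
        simp [pvAcc, pvSm2, hb, h1]
    · rw [if_neg (by simpa using hb), ih _ hmt]
      have h0 : pvSm2 s1 s2 m = 0 := by rw [pvSm2, if_neg hb]
      simp [pvAcc, h0]

-- a & 1 is the low bit
theorem pv_and_one_testBit (a : Nat) : (a &&& 1 ≠ 0) ↔ a.testBit 0 := by
  rw [Nat.and_one_is_mod]
  rcases Nat.mod_two_eq_zero_or_one a with h | h <;> simp [Nat.testBit_zero, h]

-- B-side: the range(32) reconstruction loop, Nat core
theorem pv_bits_core (s C : Nat) (T : List (Int × Int)) (w : Int)
    (hmem : ∀ j : Nat, ((w, (j : Int)) ∈ T) ↔ C.testBit j) (n : Nat) (r0 : Nat) :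
    (List.range n).foldl (fun r (j : Nat) =>
        if PySem.Int.band (pvShr ((s : Nat) : Int) j) 1 ≠ 0 ∧ ¬ (w, (j : Int)) ∈ T then
          PySem.Int.bor r (pvShl 1 j) else r) (r0 : Int)
      = ((r0 ||| (Nat.ldiff s C) % 2 ^ n : Nat) : Int) := by
  induction n with
  | zero => simp [Nat.mod_one]
  | succ n ih =>
    rw [List.range_succ, List.foldl_append, ih, List.foldl_cons, List.foldl_nil]
    have hcond : (PySem.Int.band (pvShr ((s : Nat) : Int) n) 1 ≠ 0 ∧ ¬ (w, (n : Int)) ∈ T)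
        ↔ (Nat.ldiff s C).testBit n = true := by
      rw [pv_shr_cast]
      have hb : PySem.Int.band ((( s >>> n : Nat) : Int)) 1 = (((s >>> n) &&& 1 : Nat) : Int) := by
        exact_mod_cast PySem.Int.band_natCast (s >>> n) 1
      rw [hb, hmem n, Nat.testBit_ldiff]
      have h1 : ((((s >>> n) &&& 1 : Nat) : Int) ≠ 0) ↔ ((s >>> n) &&& 1 ≠ 0) := by
        omega
      rw [h1, pv_and_one_testBit]
      have h2 : (s >>> n).testBit 0 = s.testBit n := by
        rw [Nat.testBit_shiftRight, Nat.add_zero]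
      rw [h2]
      cases hC : C.testBit n <;> cases hS : s.testBit n <;> simp
    by_cases hd : (Nat.ldiff s C).testBit n = true
    · rw [if_pos (hcond.mpr hd), pv_bor_shift]
      congr 1
      apply Nat.eq_of_testBit_eq; intro j
      simp only [Nat.testBit_or, Nat.testBit_mod_two_pow, Nat.one_shiftLeft, Nat.testBit_two_pow]
      by_cases hj : j = n
      · subst hj; simp [hd]
      · have hlt : (j < n) = (j < n + 1) := by
          apply propext; constructor <;> intro h <;> omega
        simp [Ne.symm hj, hlt]
    · rw [if_neg (fun h => hd (hcond.mp h))]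
      congr 2
      apply Nat.eq_of_testBit_eq; intro j
      simp only [Nat.testBit_mod_two_pow]
      by_cases hj : j = n
      · subst hj
        have hd' : (Nat.ldiff s C).testBit j = false := by
          cases h : (Nat.ldiff s C).testBit j
          · rfl
          · exact absurd h hd
        simp [hd']
      · have hlt : (j < n) = (j < n + 1) := by
          apply propext; constructor <;> intro h <;> omega
        simp [hlt]

theorem pv_ldiff_le (s C : Nat) : Nat.ldiff s C ≤ s := by
  rw [← pv_sub_and_eq_ldiff]; exact Nat.sub_le _ _

theorem pv_bits_fold (s C : Nat) (T : List (Int × Int)) (w : Int)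
    (hmem : ∀ j : Nat, ((w, (j : Int)) ∈ T) ↔ C.testBit j) (hs : s < 2 ^ 32) :
    (PySem.List.pyRange 0 32 1).foldl (fun r i =>
        if PySem.Int.band (pvShr ((s : Nat) : Int) i.toNat) 1 ≠ 0 ∧ ¬ (w, i) ∈ T then
          PySem.Int.bor r (pvShl 1 i.toNat) else r) 0
      = ((Nat.ldiff s C : Nat) : Int) := by
  have h32 : ((32:Int)) = ((32:Nat) : Int) := rfl
  rw [h32, PySem.List.pyRange_zero_natCast, List.foldl_map]
  have hcore := pv_bits_core s C T w hmem 32 0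
  rw [Nat.zero_or, Nat.mod_eq_of_lt (lt_of_le_of_lt (pv_ldiff_le s C) hs)] at hcore
  simp only [Int.toNat_natCast]
  exact hcore

-- testBit of an accumulated mask: some move contributes the bit
theorem pv_testBit_acc (f : Int × Int × Int × Int → Nat) (ms : List (Int × Int × Int × Int)) (j : Nat) :
    (pvAcc f ms).testBit j = true ↔ ∃ m ∈ ms, (f m).testBit j = true := by
  induction ms with
  | nil => simp [pvAcc]
  | cons m ms ih => simp [pvAcc, Nat.testBit_or, ih]

theorem pv_cm1_testBit (m : Int × Int × Int × Int) (j : Nat) :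
    (pvCm1 m).testBit j = true ↔ ((m.1 = 1 ∧ m.2.1.toNat = j) ∨ (m.2.2.1 = 1 ∧ m.2.2.2.toNat = j)) := by
  unfold pvCm1
  rw [Nat.testBit_or]
  by_cases h1 : m.1 = 1 <;> by_cases h2 : m.2.2.1 = 1 <;>
    simp [h1, h2, Nat.one_shiftLeft, Nat.testBit_two_pow]

theorem pv_cm2_testBit (m : Int × Int × Int × Int) (j : Nat) :
    (pvCm2 m).testBit j = true ↔ ((¬ m.1 = 1 ∧ m.2.1.toNat = j) ∨ (¬ m.2.2.1 = 1 ∧ m.2.2.2.toNat = j)) := by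
  unfold pvCm2
  rw [Nat.testBit_or]
  by_cases h1 : m.1 = 1 <;> by_cases h2 : m.2.2.1 = 1 <;>
    simp [h1, h2, Nat.one_shiftLeft, Nat.testBit_two_pow]

-- membership in 'touched' coincides with the clear-mask bits (needs Pre_'s nonnegativity)
theorem pv_touched1 (ms : List (Int × Int × Int × Int))
    (hpre : ∀ m ∈ ms, (m.1 = 1 ∨ m.1 = 2) ∧ 0 ≤ m.2.1 ∧ (m.2.2.1 = 1 ∨ m.2.2.1 = 2) ∧ 0 ≤ m.2.2.2) (j : Nat) :
    (((1 : Int), (j : Int)) ∈ PySem.Set.union (PySem.Set.ofList (ms.map (fun m => ((m.1, m.2.1) : Int × Int))))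
        (ms.map (fun m => ((m.2.2.1, m.2.2.2) : Int × Int)))) ↔ (pvAcc pvCm1 ms).testBit j := by
  rw [PySem.Set.mem_union, PySem.Set.mem_ofList, pv_testBit_acc]
  simp only [List.mem_map, Prod.mk.injEq]
  constructor
  · rintro (⟨m, hm, h1, h2⟩ | ⟨m, hm, h1, h2⟩)
    · exact ⟨m, hm, (pv_cm1_testBit m j).mpr (Or.inl ⟨h1, by omega⟩)⟩
    · exact ⟨m, hm, (pv_cm1_testBit m j).mpr (Or.inr ⟨h1, by omega⟩)⟩
  · rintro ⟨m, hm, hb⟩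
    rcases (pv_cm1_testBit m j).mp hb with ⟨h1, h2⟩ | ⟨h1, h2⟩
    · exact Or.inl ⟨m, hm, h1, by have := (hpre m hm).2.1; omega⟩
    · exact Or.inr ⟨m, hm, h1, by have := (hpre m hm).2.2.2; omega⟩

theorem pv_touched2 (ms : List (Int × Int × Int × Int))
    (hpre : ∀ m ∈ ms, (m.1 = 1 ∨ m.1 = 2) ∧ 0 ≤ m.2.1 ∧ (m.2.2.1 = 1 ∨ m.2.2.1 = 2) ∧ 0 ≤ m.2.2.2) (j : Nat) :
    (((2 : Int), (j : Int)) ∈ PySem.Set.union (PySem.Set.ofList (ms.map (fun m => ((m.1, m.2.1) : Int × Int))))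
        (ms.map (fun m => ((m.2.2.1, m.2.2.2) : Int × Int)))) ↔ (pvAcc pvCm2 ms).testBit j := by
  rw [PySem.Set.mem_union, PySem.Set.mem_ofList, pv_testBit_acc]
  simp only [List.mem_map, Prod.mk.injEq]
  constructor
  · rintro (⟨m, hm, h1, h2⟩ | ⟨m, hm, h1, h2⟩)
    · exact ⟨m, hm, (pv_cm2_testBit m j).mpr (Or.inl ⟨by omega, by omega⟩)⟩
    · exact ⟨m, hm, (pv_cm2_testBit m j).mpr (Or.inr ⟨by omega, by omega⟩)⟩
  · rintro ⟨m, hm, hb⟩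
    rcases (pv_cm2_testBit m j).mp hb with ⟨h1, h2⟩ | ⟨h1, h2⟩
    · have hp := (hpre m hm).1
      have hw : m.1 = 2 := by rcases hp with h | h; exacts [absurd h h1, h]
      exact Or.inl ⟨m, hm, hw, by have := (hpre m hm).2.1; omega⟩
    · have hp := (hpre m hm).2.2.1
      have hw : m.2.2.1 = 2 := by rcases hp with h | h; exacts [absurd h h1, h]
      exact Or.inr ⟨m, hm, hw, by have := (hpre m hm).2.2.2; omega⟩

-- ===== VERDICT (by name: the statement is the Claim_ definition above) =====
theorem move_bits_py_spec : Claim_equal_move_bits_py := by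
  intro flags_1 flags_2 moves _hdom hpre
  simp only [Spec_move_bits_py, move_bits_py, move_bits_py_alt]
  have h1 : PySem.Int.band flags_1 0xFFFFFFFF = (((PySem.Int.band flags_1 0xFFFFFFFF).toNat : Nat) : Int) :=
    (Int.toNat_of_nonneg (pv_src_nonneg flags_1)).symm
  have h2 : PySem.Int.band flags_2 0xFFFFFFFF = (((PySem.Int.band flags_2 0xFFFFFFFF).toNat : Nat) : Int) :=
    (Int.toNat_of_nonneg (pv_src_nonneg flags_2)).symm
  rw [h1, h2]
  rw [pv_clear_fold, pv_set_fold]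
  rw [pv_bits_fold _ _ _ _ (pv_touched1 moves hpre) (pv_src_lt flags_1),
      pv_bits_fold _ _ _ _ (pv_touched2 moves hpre) (pv_src_lt flags_2),
      pv_ones_fold1, pv_ones_fold2 _ _ _ _ (fun m hm => (hpre m hm).2.2.1)]
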